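-- pv_equiv track=rewrite | github.com/mschwar/context-project | src/ctx/stats_board.py | _classify_errors
-- ===== SOURCE A (Python) =====
-- def _classify_errors(errors: list[str]) -> dict:
--     """Categorize error strings into named buckets."""
--     counts: dict[str, int] = {
--         "transient": 0,
--         "timeout": 0,
--         "rate_limit": 0,
--         "budget": 0,
--         "other": 0,
--     }
--     for err in errors:
--         lower = err.lower()
--         if "[transient, retries exhausted]" in lower:
--             counts["transient"] += 1
--         elif "timeout" in lower:
--             counts["timeout"] += 1
--         elif "rate" in lower and "limit" in lower:
--             counts["rate_limit"] += 1
--         elif "budget" in lower: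
--             counts["budget"] += 1
--         else:
--             counts["other"] += 1
--     return counts
-- ===== SOURCE B (Python) =====
-- def _classify_errors(errors: list[str]) -> dict:
--     """Categorize error strings into named buckets (staged sieve)."""
--     pool = [e.lower() for e in errors]
--     n0 = len(pool)
--     pool = [s for s in pool if "[transient, retries exhausted]" not in s]
--     n1 = len(pool)
--     pool = [s for s in pool if "timeout" not in s]
--     n2 = len(pool)
--     pool = [s for s in pool if "rate" not in s or "limit" not in s]
--     n3 = len(pool)
--     pool = [s for s in pool if "budget" not in s]
--     n4 = len(pool)
--     return {
--         "transient": n0 - n1,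
--         "timeout": n1 - n2,
--         "rate_limit": n2 - n3,
--         "budget": n3 - n4,
--         "other": n4,
--     }
-- ===== Notes on version B (the rewrite author's own statement) =====
-- stated objective: alternative
-- what changed: Replaces A's single pass that dispatches each error through an if/elif chain into dict increments by a staged sieve: lowercase once, then successively filter out the strings matching each bucket's condition, reading each count as the difference of consecutive pool lengths and 'other' as what survives.
import Mathlib
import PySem

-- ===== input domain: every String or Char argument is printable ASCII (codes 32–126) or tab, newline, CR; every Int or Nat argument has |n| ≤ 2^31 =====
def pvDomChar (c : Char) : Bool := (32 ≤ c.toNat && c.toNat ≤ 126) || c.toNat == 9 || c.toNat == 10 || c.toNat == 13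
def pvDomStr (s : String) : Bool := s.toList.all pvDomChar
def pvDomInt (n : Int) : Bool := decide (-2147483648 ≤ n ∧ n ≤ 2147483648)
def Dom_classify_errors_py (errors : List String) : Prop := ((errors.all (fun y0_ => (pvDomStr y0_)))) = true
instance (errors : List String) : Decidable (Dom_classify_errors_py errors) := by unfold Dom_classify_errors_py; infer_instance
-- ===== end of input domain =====

-- B replaces A's one-pass dict-increment loop by a staged sieve: it lowercases once,
-- then repeatedly filters out the strings matching each bucket's marker and reads the
-- counts off the successive pool lengths, with "other" = what survives the sieve
-- (objective: alternative decomposition; not faster).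

-- ===== PORT A =====
def classify_errors_py (errors : List String) : List (String × Int) :=
  let counts : PySem.Dict String Int :=
    PySem.Dict.ofList
      [("transient", 0), ("timeout", 0), ("rate_limit", 0), ("budget", 0), ("other", 0)]
  (errors.foldl (fun counts err =>
    let lower := PySem.Str.lower err
    if PySem.Str.isIn "[transient, retries exhausted]" lower then
      counts.modify "transient" 0 (· + 1)
    else if PySem.Str.isIn "timeout" lower then
      counts.modify "timeout" 0 (· + 1)
    else if PySem.Str.isIn "rate" lower && PySem.Str.isIn "limit" lower then
      counts.modify "rate_limit" 0 (· + 1)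
    else if PySem.Str.isIn "budget" lower then
      counts.modify "budget" 0 (· + 1)
    else
      counts.modify "other" 0 (· + 1)) counts).items

-- ===== PORT B =====
def classify_errors_py_alt (errors : List String) : List (String × Int) :=
  let pool0 := errors.map PySem.Str.lower
  let n0 : Int := pool0.length
  let pool1 := pool0.filter (fun s => !PySem.Str.isIn "[transient, retries exhausted]" s)
  let n1 : Int := pool1.length
  let pool2 := pool1.filter (fun s => !PySem.Str.isIn "timeout" s)
  let n2 : Int := pool2.length
  let pool3 := pool2.filter (fun s => !PySem.Str.isIn "rate" s || !PySem.Str.isIn "limit" s)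
  let n3 : Int := pool3.length
  let pool4 := pool3.filter (fun s => !PySem.Str.isIn "budget" s)
  let n4 : Int := pool4.length
  [("transient", n0 - n1), ("timeout", n1 - n2), ("rate_limit", n2 - n3),
   ("budget", n3 - n4), ("other", n4)]

-- ===== PRECONDITION & SPEC =====
def Spec_classify_errors_py (errors : List String) (out : List (String × Int)) : Prop := out = classify_errors_py_alt errors
instance (errors : List String) (out : List (String × Int)) : Decidable (Spec_classify_errors_py errors out) := by unfold Spec_classify_errors_py; infer_instance

-- ===== CLAIM (what is proved, stated in full; the proofs are below) =====
def Claim_equal_classify_errors_py : Prop := ∀ (errors : List String), Dom_classify_errors_py errors → Spec_classify_errors_py errors (classify_errors_py errors)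

-- ===== LEMMAS AND PROOFS =====

-- Compound predicates over the lowercased string: which bucket an element falls in.
def pvQ1 (s : String) : Bool := PySem.Str.isIn "[transient, retries exhausted]" s
def pvQ2 (s : String) : Bool := !pvQ1 s && PySem.Str.isIn "timeout" s
def pvQ3 (s : String) : Bool :=
  !pvQ1 s && !PySem.Str.isIn "timeout" s && (PySem.Str.isIn "rate" s && PySem.Str.isIn "limit" s)
def pvQ4 (s : String) : Bool :=
  !pvQ1 s && !PySem.Str.isIn "timeout" s && !(PySem.Str.isIn "rate" s && PySem.Str.isIn "limit" s)
    && PySem.Str.isIn "budget" s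
def pvQ5 (s : String) : Bool :=
  !pvQ1 s && !PySem.Str.isIn "timeout" s && !(PySem.Str.isIn "rate" s && PySem.Str.isIn "limit" s)
    && !PySem.Str.isIn "budget" s

/-- A's fold starting from an arbitrary five-key dict adds, per key,
    the number of errors whose lowercased form satisfies that key's predicate. -/
lemma fold_invariant (es : List String) :
    ∀ (t o r b x : Int),
    (es.foldl (fun counts err =>
      let lower := PySem.Str.lower err
      if PySem.Str.isIn "[transient, retries exhausted]" lower then
        counts.modify "transient" 0 (· + 1)
      else if PySem.Str.isIn "timeout" lower then
        counts.modify "timeout" 0 (· + 1)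
      else if PySem.Str.isIn "rate" lower && PySem.Str.isIn "limit" lower then
        counts.modify "rate_limit" 0 (· + 1)
      else if PySem.Str.isIn "budget" lower then
        counts.modify "budget" 0 (· + 1)
      else
        counts.modify "other" 0 (· + 1))
      (PySem.Dict.ofList
        [("transient", t), ("timeout", o), ("rate_limit", r), ("budget", b), ("other", x)])).items
    = [("transient", t + (es.countP (fun e => pvQ1 (PySem.Str.lower e)) : Int)),
       ("timeout", o + (es.countP (fun e => pvQ2 (PySem.Str.lower e)) : Int)),
       ("rate_limit", r + (es.countP (fun e => pvQ3 (PySem.Str.lower e)) : Int)),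
       ("budget", b + (es.countP (fun e => pvQ4 (PySem.Str.lower e)) : Int)),
       ("other", x + (es.countP (fun e => pvQ5 (PySem.Str.lower e)) : Int))] := by
  induction es with
  | nil => intro t o r b x; simp; rfl
  | cons e es ih =>
    intro t o r b x
    rw [List.foldl_cons]
    simp only []
    split_ifs with h1 h2 h3 h4
    · rw [show (PySem.Dict.ofList
          [("transient", t), ("timeout", o), ("rate_limit", r), ("budget", b), ("other", x)]).modify
            "transient" 0 (· + 1)
          = PySem.Dict.ofList [("transient", t + 1), ("timeout", o), ("rate_limit", r), ("budget", b), ("other", x)] from rfl, ih]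
      have hq1 : pvQ1 (PySem.Str.lower e) = true := by unfold pvQ1; rw [h1]; try rfl
      have hq2 : pvQ2 (PySem.Str.lower e) = false := by unfold pvQ2 pvQ1; rw [h1]; try rfl
      have hq3 : pvQ3 (PySem.Str.lower e) = false := by unfold pvQ3 pvQ1; rw [h1]; try rfl
      have hq4 : pvQ4 (PySem.Str.lower e) = false := by unfold pvQ4 pvQ1; rw [h1]; try rfl
      have hq5 : pvQ5 (PySem.Str.lower e) = false := by unfold pvQ5 pvQ1; rw [h1]; try rfl
      simp only [List.countP_cons, hq1, hq2, hq3, hq4, hq5]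
      simp
      omega
    · rw [show (PySem.Dict.ofList
          [("transient", t), ("timeout", o), ("rate_limit", r), ("budget", b), ("other", x)]).modify
            "timeout" 0 (· + 1)
          = PySem.Dict.ofList [("transient", t), ("timeout", o + 1), ("rate_limit", r), ("budget", b), ("other", x)] from rfl, ih]
      rw [Bool.not_eq_true] at h1
      have hq1 : pvQ1 (PySem.Str.lower e) = false := by unfold pvQ1; rw [h1]; try rfl
      have hq2 : pvQ2 (PySem.Str.lower e) = true := by unfold pvQ2 pvQ1; rw [h1, h2]; try rfl
      have hq3 : pvQ3 (PySem.Str.lower e) = false := by unfold pvQ3 pvQ1; rw [h1, h2]; try rfl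
      have hq4 : pvQ4 (PySem.Str.lower e) = false := by unfold pvQ4 pvQ1; rw [h1, h2]; try rfl
      have hq5 : pvQ5 (PySem.Str.lower e) = false := by unfold pvQ5 pvQ1; rw [h1, h2]; try rfl
      simp only [List.countP_cons, hq1, hq2, hq3, hq4, hq5]
      simp
      omega
    · rw [show (PySem.Dict.ofList
          [("transient", t), ("timeout", o), ("rate_limit", r), ("budget", b), ("other", x)]).modify
            "rate_limit" 0 (· + 1)
          = PySem.Dict.ofList [("transient", t), ("timeout", o), ("rate_limit", r + 1), ("budget", b), ("other", x)] from rfl, ih]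
      rw [Bool.not_eq_true] at h1 h2
      have hq1 : pvQ1 (PySem.Str.lower e) = false := by unfold pvQ1; rw [h1]; try rfl
      have hq2 : pvQ2 (PySem.Str.lower e) = false := by unfold pvQ2 pvQ1; rw [h1, h2]; try rfl
      have hq3 : pvQ3 (PySem.Str.lower e) = true := by unfold pvQ3 pvQ1; rw [h1, h2, h3]; try rfl
      have hq4 : pvQ4 (PySem.Str.lower e) = false := by unfold pvQ4 pvQ1; rw [h1, h2, h3]; try rfl
      have hq5 : pvQ5 (PySem.Str.lower e) = false := by unfold pvQ5 pvQ1; rw [h1, h2, h3]; try rfl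
      simp only [List.countP_cons, hq1, hq2, hq3, hq4, hq5]
      simp
      omega
    · rw [show (PySem.Dict.ofList
          [("transient", t), ("timeout", o), ("rate_limit", r), ("budget", b), ("other", x)]).modify
            "budget" 0 (· + 1)
          = PySem.Dict.ofList [("transient", t), ("timeout", o), ("rate_limit", r), ("budget", b + 1), ("other", x)] from rfl, ih]
      rw [Bool.not_eq_true] at h1 h2 h3
      have hq1 : pvQ1 (PySem.Str.lower e) = false := by unfold pvQ1; rw [h1]; try rfl
      have hq2 : pvQ2 (PySem.Str.lower e) = false := by unfold pvQ2 pvQ1; rw [h1, h2]; try rfl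
      have hq3 : pvQ3 (PySem.Str.lower e) = false := by unfold pvQ3 pvQ1; rw [h1, h2, h3]; try rfl
      have hq4 : pvQ4 (PySem.Str.lower e) = true := by unfold pvQ4 pvQ1; rw [h1, h2, h3, h4]; try rfl
      have hq5 : pvQ5 (PySem.Str.lower e) = false := by unfold pvQ5 pvQ1; rw [h1, h2, h3, h4]; try rfl
      simp only [List.countP_cons, hq1, hq2, hq3, hq4, hq5]
      simp
      omega
    · rw [show (PySem.Dict.ofList
          [("transient", t), ("timeout", o), ("rate_limit", r), ("budget", b), ("other", x)]).modify
            "other" 0 (· + 1)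
          = PySem.Dict.ofList [("transient", t), ("timeout", o), ("rate_limit", r), ("budget", b), ("other", x + 1)] from rfl, ih]
      rw [Bool.not_eq_true] at h1 h2 h3 h4
      have hq1 : pvQ1 (PySem.Str.lower e) = false := by unfold pvQ1; rw [h1]; try rfl
      have hq2 : pvQ2 (PySem.Str.lower e) = false := by unfold pvQ2 pvQ1; rw [h1, h2]; try rfl
      have hq3 : pvQ3 (PySem.Str.lower e) = false := by unfold pvQ3 pvQ1; rw [h1, h2, h3]; try rfl
      have hq4 : pvQ4 (PySem.Str.lower e) = false := by unfold pvQ4 pvQ1; rw [h1, h2, h3, h4]; try rfl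
      have hq5 : pvQ5 (PySem.Str.lower e) = true := by unfold pvQ5 pvQ1; rw [h1, h2, h3, h4]; try rfl
      simp only [List.countP_cons, hq1, hq2, hq3, hq4, hq5]
      simp
      omega

/-- B's sieve reads off exactly the bucket counts. -/
lemma alt_eq_counts (errors : List String) :
    classify_errors_py_alt errors
    = [("transient", (errors.countP (fun e => pvQ1 (PySem.Str.lower e)) : Int)),
       ("timeout", (errors.countP (fun e => pvQ2 (PySem.Str.lower e)) : Int)),
       ("rate_limit", (errors.countP (fun e => pvQ3 (PySem.Str.lower e)) : Int)),
       ("budget", (errors.countP (fun e => pvQ4 (PySem.Str.lower e)) : Int)),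
       ("other", (errors.countP (fun e => pvQ5 (PySem.Str.lower e)) : Int))] := by
  unfold classify_errors_py_alt
  induction errors with
  | nil => simp
  | cons e es ih =>
    cases h1 : PySem.Str.isIn "[transient, retries exhausted]" (PySem.Str.lower e) <;>
    cases h2 : PySem.Str.isIn "timeout" (PySem.Str.lower e) <;>
    cases h3 : PySem.Str.isIn "rate" (PySem.Str.lower e) <;>
    cases h4 : PySem.Str.isIn "limit" (PySem.Str.lower e) <;>
    cases h5 : PySem.Str.isIn "budget" (PySem.Str.lower e) <;>
      simp only [List.map_cons, List.filter_cons, List.countP_cons, List.length_cons,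
        pvQ1, pvQ2, pvQ3, pvQ4, pvQ5, h1, h2, h3, h4, h5, Bool.not_true, Bool.not_false,
        Bool.false_and, Bool.and_false, Bool.or_true, Bool.or_false, if_true] at ih ⊢ <;>
      simp [List.cons.injEq, Prod.mk.injEq] at ih ⊢ <;> omega

-- ===== VERDICT (by name: the statement is the Claim_ definition above) =====
theorem classify_errors_py_spec : Claim_equal_classify_errors_py := by
  intro errors _
  show classify_errors_py errors = classify_errors_py_alt errors
  unfold classify_errors_py
  rw [fold_invariant, alt_eq_counts]
  simp
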